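-- pv_equiv track=rewrite | github.com/Yuta26504/AtCoder | D - アンバランス.py | search
-- ===== SOURCE A (Python) =====
-- def search(S):
--     for i in range(len(S)-1):
--         if S[i] == S[i+1]:
--             return i+1, i+2
--     for i in range(len(S)-2):
--         if S[i] == S[i+2]:
--             return i+1, i+3
--     return -1, -1
-- ===== SOURCE B (Python) =====
-- def search(S):
--     saved = None
--     n = len(S)
--     for i in range(n - 1):
--         if S[i] == S[i + 1]:
--             return i + 1, i + 2
--         if saved is None and i + 2 < n and S[i] == S[i + 2]:
--             saved = (i + 1, i + 3)
--     return saved if saved is not None else (-1, -1)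
-- ===== Notes on version B (the rewrite author's own statement) =====
-- stated objective: alternative
-- what changed: One single pass that returns an adjacent pair immediately and records only the first skip-one candidate, instead of A's two separate full scans of the string.
import Mathlib
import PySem

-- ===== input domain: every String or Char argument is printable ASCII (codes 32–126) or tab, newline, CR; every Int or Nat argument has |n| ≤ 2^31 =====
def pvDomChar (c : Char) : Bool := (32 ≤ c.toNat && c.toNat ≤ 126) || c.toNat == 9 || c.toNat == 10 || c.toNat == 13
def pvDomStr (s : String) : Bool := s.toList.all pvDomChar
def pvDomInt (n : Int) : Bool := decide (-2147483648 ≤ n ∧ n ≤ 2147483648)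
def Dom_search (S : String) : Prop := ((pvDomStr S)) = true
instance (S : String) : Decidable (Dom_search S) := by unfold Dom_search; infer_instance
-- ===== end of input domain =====

-- B is a single pass (adjacent pair returns immediately; only the first skip-one candidate is saved),
-- replacing A's two full scans; same return value everywhere.

-- ===== PORT A =====
-- first loop: for i in range(len(S)-1): if S[i] == S[i+1]: return i+1, i+2
def searchAdj : List Char → Int → Option (Int × Int)
  | a :: b :: rest, i => if a = b then some (i + 1, i + 2) else searchAdj (b :: rest) (i + 1)
  | _, _ => none

-- second loop: for i in range(len(S)-2): if S[i] == S[i+2]: return i+1, i+3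
def searchSkip : List Char → Int → Option (Int × Int)
  | a :: b :: c :: rest, i =>
      if a = c then some (i + 1, i + 3) else searchSkip (b :: c :: rest) (i + 1)
  | _, _ => none

def search (S : String) : Int × Int :=
  match searchAdj S.toList 0 with
  | some p => p
  | none =>
    match searchSkip S.toList 0 with
    | some p => p
    | none => (-1, -1)

-- ===== PORT B =====
-- single pass carrying the first saved skip-one candidate
def searchScan : List Char → Int → Option (Int × Int) → Int × Int
  | a :: b :: rest, i, saved =>
      if a = b then (i + 1, i + 2)
      else
        let saved' :=
          match saved, rest with
          | none, c :: _ => if a = c then some (i + 1, i + 3) else none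
          | _, _ => saved
        searchScan (b :: rest) (i + 1) saved'
  | _, _, saved => saved.getD (-1, -1)

def search_alt (S : String) : Int × Int := searchScan S.toList 0 none

-- ===== PRECONDITION & SPEC =====
def Spec_search (S : String) (out : Int × Int) : Prop := out = search_alt S
instance (S : String) (out : Int × Int) : Decidable (Spec_search S out) := by unfold Spec_search; infer_instance

-- ===== CLAIM (what is proved, stated in full; the proofs are below) =====
def Claim_equal_search : Prop := ∀ (S : String), Dom_search S → Spec_search S (search S)

-- ===== LEMMAS AND PROOFS =====

lemma searchScan_eq (l : List Char) : ∀ (i : Int) (saved : Option (Int × Int)),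
    searchScan l i saved =
      match searchAdj l i with
      | some p => p
      | none =>
        match saved with
        | some q => q
        | none => (searchSkip l i).getD (-1, -1) := by
  induction l with
  | nil => intro i saved; cases saved <;> simp [searchScan, searchAdj, searchSkip]
  | cons a t ih =>
    intro i saved
    cases t with
    | nil => cases saved <;> simp [searchScan, searchAdj, searchSkip]
    | cons b rest =>
      by_cases hab : a = b
      · simp [searchScan, searchAdj, hab]
      · cases saved with
        | some q =>
          cases rest with
          | nil =>
            simp [searchScan, searchAdj, hab, ih]
          | cons c rest' =>
            have ha : searchAdj (a :: b :: c :: rest') i = searchAdj (b :: c :: rest') (i + 1) := by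
              rw [searchAdj]; simp [hab]
            rw [searchScan]
            simp only [hab, if_false]
            rw [ih, ha]
            cases h : searchAdj (b :: c :: rest') (i + 1) <;> simp
        | none =>
          cases rest with
          | nil =>
            simp [searchScan, searchAdj, searchSkip, hab, ih]
          | cons c rest' =>
            have ha : searchAdj (a :: b :: c :: rest') i = searchAdj (b :: c :: rest') (i + 1) := by
              rw [searchAdj]; simp [hab]
            by_cases hac : a = c
            · subst hac
              have hs : searchSkip (a :: b :: a :: rest') i = some (i + 1, i + 3) := by
                rw [searchSkip]; simp
              rw [searchScan]
              simp only [hab, if_false, if_pos rfl]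
              rw [ih, ha, hs]
              cases h : searchAdj (b :: a :: rest') (i + 1) <;> simp
            · have hs : searchSkip (a :: b :: c :: rest') i = searchSkip (b :: c :: rest') (i + 1) := by
                rw [searchSkip]; simp [hac]
              rw [searchScan]
              simp only [hab, if_false, hac, if_false]
              rw [ih, ha, hs]

-- ===== VERDICT (by name: the statement is the Claim_ definition above) =====
theorem search_spec : Claim_equal_search := by
  intro S _
  unfold Spec_search search search_alt
  rw [searchScan_eq]
  cases searchAdj S.toList 0 <;> [skip; simp] <;>
    cases searchSkip S.toList 0 <;> simp
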